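-- pv_equiv track=rewrite | github.com/mazeller/flusuite | motiftime_py3.py | assignColor
-- ===== SOURCE A (Python) =====
-- clusters = {
--     'turkey':['NHNNYR'],
--     'purple':['KHHNYR','KHKNYS'],
--     'gray':['KTHKYS','NTHNFK','NTQKFN','NTHKFN'],
--     'darkgray':['KTHNFK','KTHNSK'],
--     'lightpink':['KHQKYR'],
--     'gold':['KYNNNK'],
--     'red':['NYNNYK','NYNNHK','NHNNYK','NYHNYK'],
--     'darkpink':['KHKNYR'],
--     'cyan':['NNNDYR', 'NHSNYR', 'NHNNYR', 'NHNDYR'],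
--     'brown':['NYHGHE'],
--     'darkgreen':['KYKNYE'],
--     'lightgreen':['KYNNYK'],
--     'orange':['KHKNYE'],
--     'blue':['KHNNYK'],
--     'lightblue':['KHKEYS','KHHNYR']
-- }
--
-- def assignColor(motif):
-- 	antigenicColor = "unknown"
--
-- 	for key,list in clusters.items():
-- 		for clusterMotif in list:
-- 			if(motif == clusterMotif):
-- 				antigenicColor = key;
-- 				return antigenicColor;
--
-- 	return antigenicColor
-- ===== SOURCE B (Python) =====
-- # Sorted motif->color table (motifs unique; for motifs listed under two colors --
-- # NHNNYR, KHHNYR -- the FIRST cluster in the original table wins), searched by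
-- # hand-rolled binary search instead of scanning the clusters dict.
-- _TABLE = [
--     ('KHHNYR', 'purple'), ('KHKEYS', 'lightblue'), ('KHKNYE', 'orange'),
--     ('KHKNYR', 'darkpink'), ('KHKNYS', 'purple'), ('KHNNYK', 'blue'),
--     ('KHQKYR', 'lightpink'), ('KTHKYS', 'gray'), ('KTHNFK', 'darkgray'),
--     ('KTHNSK', 'darkgray'), ('KYKNYE', 'darkgreen'), ('KYNNNK', 'gold'),
--     ('KYNNYK', 'lightgreen'), ('NHNDYR', 'cyan'), ('NHNNYK', 'red'),
--     ('NHNNYR', 'turkey'), ('NHSNYR', 'cyan'), ('NNNDYR', 'cyan'),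
--     ('NTHKFN', 'gray'), ('NTHNFK', 'gray'), ('NTQKFN', 'gray'),
--     ('NYHGHE', 'brown'), ('NYHNYK', 'red'), ('NYNNHK', 'red'),
--     ('NYNNYK', 'red'),
-- ]
--
-- def assignColor(motif):
--     lo, hi = 0, len(_TABLE)
--     while lo < hi:
--         mid = (lo + hi) // 2
--         if _TABLE[mid][0] < motif:
--             lo = mid + 1
--         else:
--             hi = mid
--     if lo < len(_TABLE) and _TABLE[lo][0] == motif:
--         return _TABLE[lo][1]
--     return "unknown"
-- ===== Notes on version B (the rewrite author's own statement) =====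
-- stated objective: alternative
-- what changed: Replaces the nested per-call scan over the clusters dict with a precomputed motif-sorted reverse table (first cluster wins for the duplicated motifs NHNNYR and KHHNYR) searched by binary search, so the call does O(log n) comparisons instead of scanning every cluster.
import Mathlib
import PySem

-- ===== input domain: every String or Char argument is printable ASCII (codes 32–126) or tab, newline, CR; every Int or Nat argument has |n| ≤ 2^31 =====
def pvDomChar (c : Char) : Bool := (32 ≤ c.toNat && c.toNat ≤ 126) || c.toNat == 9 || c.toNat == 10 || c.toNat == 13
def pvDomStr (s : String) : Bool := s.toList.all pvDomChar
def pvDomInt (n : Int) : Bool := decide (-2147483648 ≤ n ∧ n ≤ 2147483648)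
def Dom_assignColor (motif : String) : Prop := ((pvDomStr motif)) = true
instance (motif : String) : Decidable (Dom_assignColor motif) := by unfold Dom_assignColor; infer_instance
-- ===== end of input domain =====

-- B replaces the nested scan over the clusters dict with a hand-written sorted motif→color table
-- (first cluster wins for the duplicated motifs) searched by binary search; same return value.

-- ===== PORT A =====
-- the module-level 'clusters' dict (insertion order)
def clustersA : List (String × List String) :=
  [("turkey", ["NHNNYR"]),
   ("purple", ["KHHNYR", "KHKNYS"]),
   ("gray", ["KTHKYS", "NTHNFK", "NTQKFN", "NTHKFN"]),
   ("darkgray", ["KTHNFK", "KTHNSK"]),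
   ("lightpink", ["KHQKYR"]),
   ("gold", ["KYNNNK"]),
   ("red", ["NYNNYK", "NYNNHK", "NHNNYK", "NYHNYK"]),
   ("darkpink", ["KHKNYR"]),
   ("cyan", ["NNNDYR", "NHSNYR", "NHNNYR", "NHNDYR"]),
   ("brown", ["NYHGHE"]),
   ("darkgreen", ["KYKNYE"]),
   ("lightgreen", ["KYNNYK"]),
   ("orange", ["KHKNYE"]),
   ("blue", ["KHNNYK"]),
   ("lightblue", ["KHKEYS", "KHHNYR"])]

-- inner 'for clusterMotif in list: if motif == clusterMotif: return key'
def innerScanA (motif key : String) : List String → Option String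
  | [] => none
  | m :: ms => if motif == m then some key else innerScanA motif key ms

-- outer 'for key, list in clusters.items()'
def outerScanA (motif : String) : List (String × List String) → Option String
  | [] => none
  | (key, lst) :: rest =>
    match innerScanA motif key lst with
    | some c => some c
    | none => outerScanA motif rest

def assignColor (motif : String) : String :=
  match outerScanA motif clustersA with
  | some c => c
  | none => "unknown"    -- the initial antigenicColor returned after both loops finish

-- ===== PORT B =====
-- Source B's _TABLE literal: motifs in sorted order, each mapped to its (first) color
def tableB : List (String × String) :=
  [("KHHNYR", "purple"), ("KHKEYS", "lightblue"), ("KHKNYE", "orange"),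
   ("KHKNYR", "darkpink"), ("KHKNYS", "purple"), ("KHNNYK", "blue"),
   ("KHQKYR", "lightpink"), ("KTHKYS", "gray"), ("KTHNFK", "darkgray"),
   ("KTHNSK", "darkgray"), ("KYKNYE", "darkgreen"), ("KYNNNK", "gold"),
   ("KYNNYK", "lightgreen"), ("NHNDYR", "cyan"), ("NHNNYK", "red"),
   ("NHNNYR", "turkey"), ("NHSNYR", "cyan"), ("NNNDYR", "cyan"),
   ("NTHKFN", "gray"), ("NTHNFK", "gray"), ("NTQKFN", "gray"),
   ("NYHGHE", "brown"), ("NYHNYK", "red"), ("NYNNHK", "red"),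
   ("NYNNYK", "red")]

-- the 'while lo < hi' binary-search loop; fuel only makes the recursion structural
-- (the gap hi - lo shrinks every iteration, so fuel = hi - lo at the call is enough)
def bsearchB (t : List (String × String)) (motif : String) : Nat → Nat → Nat → Nat
  | 0, lo, _ => lo
  | fuel + 1, lo, hi =>
    if lo < hi then
      if PySem.Chars.strLt (t.getD ((lo + hi) / 2) ("", "")).1.toList motif.toList then  -- Python str '<' (PySem-exact)
        bsearchB t motif fuel ((lo + hi) / 2 + 1) hi
      else
        bsearchB t motif fuel lo ((lo + hi) / 2)
    else lo

def assignColor_alt (motif : String) : String :=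
  let r := bsearchB tableB motif tableB.length 0 tableB.length
  if r < tableB.length && (tableB.getD r ("", "")).1 == motif then
    (tableB.getD r ("", "")).2
  else "unknown"

-- ===== PRECONDITION & SPEC =====
def Spec_assignColor (motif : String) (out : String) : Prop := out = assignColor_alt motif
instance (motif : String) (out : String) : Decidable (Spec_assignColor motif out) := by unfold Spec_assignColor; infer_instance

-- ===== CLAIM (what is proved, stated in full; the proofs are below) =====
def Claim_equal_assignColor : Prop := ∀ (motif : String), Dom_assignColor motif → Spec_assignColor motif (assignColor motif)

-- ===== LEMMAS AND PROOFS =====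
-- the binary search never leaves [lo, hi]
theorem bsearchB_le (t : List (String × String)) (motif : String) :
    ∀ (fuel lo hi : Nat), lo ≤ hi → bsearchB t motif fuel lo hi ≤ hi := by
  intro fuel
  induction fuel with
  | zero => intro lo hi h; simpa [bsearchB] using h
  | succ n ih =>
    intro lo hi h
    simp only [bsearchB]
    split_ifs with h1 h2
    · exact ih _ _ (by omega)
    · exact Nat.le_trans (ih _ _ (by omega)) (by omega)
    · exact h

theorem assignColor_eq (motif : String) : assignColor motif = assignColor_alt motif := by
  by_cases h1 : motif = "NHNNYR"
  · subst h1; decide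
  by_cases h2 : motif = "KHHNYR"
  · subst h2; decide
  by_cases h3 : motif = "KHKNYS"
  · subst h3; decide
  by_cases h4 : motif = "KTHKYS"
  · subst h4; decide
  by_cases h5 : motif = "NTHNFK"
  · subst h5; decide
  by_cases h6 : motif = "NTQKFN"
  · subst h6; decide
  by_cases h7 : motif = "NTHKFN"
  · subst h7; decide
  by_cases h8 : motif = "KTHNFK"
  · subst h8; decide
  by_cases h9 : motif = "KTHNSK"
  · subst h9; decide
  by_cases h10 : motif = "KHQKYR"
  · subst h10; decide
  by_cases h11 : motif = "KYNNNK"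
  · subst h11; decide
  by_cases h12 : motif = "NYNNYK"
  · subst h12; decide
  by_cases h13 : motif = "NYNNHK"
  · subst h13; decide
  by_cases h14 : motif = "NHNNYK"
  · subst h14; decide
  by_cases h15 : motif = "NYHNYK"
  · subst h15; decide
  by_cases h16 : motif = "KHKNYR"
  · subst h16; decide
  by_cases h17 : motif = "NNNDYR"
  · subst h17; decide
  by_cases h18 : motif = "NHSNYR"
  · subst h18; decide
  by_cases h19 : motif = "NHNDYR"
  · subst h19; decide
  by_cases h20 : motif = "NYHGHE"
  · subst h20; decide
  by_cases h21 : motif = "KYKNYE"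
  · subst h21; decide
  by_cases h22 : motif = "KYNNYK"
  · subst h22; decide
  by_cases h23 : motif = "KHKNYE"
  · subst h23; decide
  by_cases h24 : motif = "KHNNYK"
  · subst h24; decide
  by_cases h25 : motif = "KHKEYS"
  · subst h25; decide
  -- motif matches no table motif: both sides return "unknown"
  have ha : assignColor motif = "unknown" := by
    simp [assignColor, outerScanA, innerScanA, clustersA, h1, h2, h3, h4, h5, h6, h7, h8, h9,
      h10, h11, h12, h13, h14, h15, h16, h17, h18, h19, h20, h21, h22, h23, h24, h25]
  have hb : assignColor_alt motif = "unknown" := by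
    unfold assignColor_alt
    have hr : bsearchB tableB motif tableB.length 0 tableB.length ≤ tableB.length :=
      bsearchB_le tableB motif _ _ _ (Nat.zero_le _)
    obtain ⟨r, hrdef⟩ : ∃ r, bsearchB tableB motif tableB.length 0 tableB.length = r := ⟨_, rfl⟩
    rw [hrdef] at hr ⊢
    have hlen : tableB.length = 25 := by decide
    rw [hlen] at hr
    interval_cases r <;>
      simp [tableB, Ne.symm h1, Ne.symm h2, Ne.symm h3, Ne.symm h4, Ne.symm h5, Ne.symm h6,
        Ne.symm h7, Ne.symm h8, Ne.symm h9, Ne.symm h10, Ne.symm h11, Ne.symm h12, Ne.symm h13,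
        Ne.symm h14, Ne.symm h15, Ne.symm h16, Ne.symm h17, Ne.symm h18, Ne.symm h19, Ne.symm h20,
        Ne.symm h21, Ne.symm h22, Ne.symm h23, Ne.symm h24, Ne.symm h25]
  rw [ha, hb]

-- ===== VERDICT (by name: the statement is the Claim_ definition above) =====
theorem assignColor_spec : Claim_equal_assignColor := by
  intro motif _
  exact assignColor_eq motif
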